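-- pv_equiv track=rewrite | github.com/mapleleaflatte03/meridian-intelligence | company/meridian_platform/loom_schedule_bridge.py | _merge_report_status_lines
-- ===== SOURCE A (Python) =====
-- def _report_status_key(line: str) -> str:
--     stripped = line.strip()
--     if not stripped.startswith("- "):
--         return stripped.lower()
--     body = stripped[2:].strip()
--     if ":" in body:
--         return body.split(":", 1)[0].strip().lower()
--     return body.lower()
--
-- def _merge_report_status_lines(existing: list[str], updates: list[str]) -> list[str]:
--     merged: list[str] = []
--     positions: dict[str, int] = {}
--
--     def ingest(raw_line: str) -> None:
--         line = raw_line.rstrip()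
--         if not line.strip():
--             return
--         key = _report_status_key(line)
--         normalized = line if line.startswith("- ") else f"- {line.lstrip('- ').strip()}"
--         if key in positions:
--             merged[positions[key]] = normalized
--         else:
--             positions[key] = len(merged)
--             merged.append(normalized)
--
--     for line in existing:
--         ingest(line)
--     for line in updates:
--         ingest(line)
--     return merged
-- ===== SOURCE B (Python) =====
-- def _report_status_key(line: str) -> str:
--     stripped = line.strip()
--     if not stripped.startswith("- "):
--         return stripped.lower()
--     body = stripped[2:].strip()
--     if ":" in body:
--         return body.split(":", 1)[0].strip().lower()
--     return body.lower()
--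
-- def _merge_report_status_lines(existing: list[str], updates: list[str]) -> list[str]:
--     # Stage 1: clean every line once into (key, normalized) pairs.
--     pairs = []
--     for raw in existing + updates:
--         line = raw.rstrip()
--         if not line.strip():
--             continue
--         normalized = line if line.startswith("- ") else "- " + line.lstrip("- ").strip()
--         pairs.append((_report_status_key(line), normalized))
--     # Stage 2: emit, in first-occurrence order of keys, the value of the
--     # last pair carrying that key (found by scanning from the right).
--     out = []
--     seen = set()
--     for key, _ in pairs:
--         if key not in seen:
--             seen.add(key)
--             out.append(next(v for k, v in reversed(pairs) if k == key))
--     return out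
-- ===== Notes on version B (the rewrite author's own statement) =====
-- stated objective: alternative
-- what changed: Replaces A's single-pass state machine (growing list + key->index dict with in-place assignment) by two staged passes: first clean every line into a (key, normalized) pair list, then emit, per first-occurrence key, the value of the last pair with that key found by a reverse scan; no dict and no index bookkeeping.
import Mathlib
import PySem

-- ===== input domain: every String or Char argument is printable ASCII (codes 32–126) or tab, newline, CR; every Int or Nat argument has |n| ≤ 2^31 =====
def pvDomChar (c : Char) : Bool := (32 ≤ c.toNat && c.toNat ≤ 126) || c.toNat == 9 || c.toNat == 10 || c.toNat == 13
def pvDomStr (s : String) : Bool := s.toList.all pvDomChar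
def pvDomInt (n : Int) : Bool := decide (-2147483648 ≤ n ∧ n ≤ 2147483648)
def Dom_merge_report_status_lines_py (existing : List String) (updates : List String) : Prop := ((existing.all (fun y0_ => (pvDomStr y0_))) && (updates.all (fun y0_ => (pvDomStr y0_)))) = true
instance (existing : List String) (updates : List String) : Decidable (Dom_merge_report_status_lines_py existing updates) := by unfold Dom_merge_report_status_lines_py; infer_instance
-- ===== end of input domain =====

-- B replaces A's incremental list+index state machine by two staged passes: clean all lines
-- into (key, normalized) pairs once, then emit per first-occurrence key the value found by a
-- reverse scan of the pairs (objective: alternative; no dict, no in-place index updates).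

-- ===== PORT A =====
-- shared helper `_report_status_key` (identical in A and B)
def report_status_key_py (line : String) : String :=
  let stripped := PySem.Str.strip line
  if !(PySem.Str.startswith stripped "- ") then PySem.Str.lower stripped
  else
    let body := PySem.Str.strip (PySem.Str.slice stripped (some 2) none)
    if PySem.Str.isIn ":" body then
      -- body.split(":", 1)[0]: the split list is always nonempty, so the defaults are never used
      PySem.Str.lower (PySem.Str.strip (((PySem.Str.splitMax? body ":" 1).getD []).headD ""))
    else PySem.Str.lower body

-- hand port of Python str.lstrip("- "): drop leading characters belonging to {'-', ' '} (exact)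
def lstripDashSpace (s : String) : String := String.ofList (s.toList.dropWhile (fun c => c == '-' || c == ' '))

def ingestA (st : List String × PySem.Dict String Nat) (raw_line : String) : List String × PySem.Dict String Nat :=
  let line := PySem.Str.rstrip raw_line
  if PySem.Str.strip line = "" then st
  else
    let key := report_status_key_py line
    let normalized := if PySem.Str.startswith line "- " then line else "- " ++ PySem.Str.strip (lstripDashSpace line)
    match st.2.get? key with
    | some i => (st.1.set i normalized, st.2)        -- `merged[positions[key]] = normalized` (index always in range)
    | none   => (st.1 ++ [normalized], st.2.insert key st.1.length)

def merge_report_status_lines_py (existing : List String) (updates : List String) : List String :=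
  let st := existing.foldl ingestA ([], PySem.Dict.empty)
  let st := updates.foldl ingestA st
  st.1

-- ===== PORT B =====
-- stage 1: clean each raw line into a (key, normalized) pair, skipping blanks
def cleanStep (acc : List (String × String)) (raw : String) : List (String × String) :=
  let line := PySem.Str.rstrip raw
  if PySem.Str.strip line = "" then acc
  else acc ++ [(report_status_key_py line,
    if PySem.Str.startswith line "- " then line else "- " ++ PySem.Str.strip (lstripDashSpace line))]

-- `next(v for k, v in reversed(pairs) if k == key)`: the generator always matches
-- (key comes from pairs), so the `.getD ""` default is never used
def lastValIn (pairs : List (String × String)) (key : String) : String :=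
  ((pairs.reverse.find? (fun q => q.1 == key)).map Prod.snd).getD ""

-- stage 2: emit in first-occurrence key order, value from the reverse scan
def emitStep (pairs : List (String × String)) (st : PySem.Set String × List String) (p : String × String) : PySem.Set String × List String :=
  if PySem.Set.contains st.1 p.1 then st
  else (PySem.Set.add st.1 p.1, st.2 ++ [lastValIn pairs p.1])

def merge_report_status_lines_py_alt (existing : List String) (updates : List String) : List String :=
  let pairs := (existing ++ updates).foldl cleanStep []
  (pairs.foldl (emitStep pairs) (PySem.Set.empty, [])).2

-- ===== PRECONDITION & SPEC =====
def Spec_merge_report_status_lines_py (existing : List String) (updates : List String) (out : List String) : Prop := out = merge_report_status_lines_py_alt existing updates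
instance (existing : List String) (updates : List String) (out : List String) : Decidable (Spec_merge_report_status_lines_py existing updates out) := by unfold Spec_merge_report_status_lines_py; infer_instance

-- ===== CLAIM (what is proved, stated in full; the proofs are below) =====
def Claim_equal_merge_report_status_lines_py : Prop := ∀ (existing : List String) (updates : List String), Dom_merge_report_status_lines_py existing updates → Spec_merge_report_status_lines_py existing updates (merge_report_status_lines_py existing updates)

-- ===== LEMMAS AND PROOFS =====

-- A's per-pair state transition (ingestA after cleaning)
def stepA (st : List String × PySem.Dict String Nat) (p : String × String) : List String × PySem.Dict String Nat :=
  match st.2.get? p.1 with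
  | some i => (st.1.set i p.2, st.2)
  | none   => (st.1 ++ [p.2], st.2.insert p.1 st.1.length)

-- first-occurrence key list of a pair list
def fkeys (L : List (String × String)) : List String :=
  L.foldl (fun ks p => PySem.Set.add ks p.1) []

theorem fkeys_eq_ofList (L : List (String × String)) :
    fkeys L = PySem.Set.ofList (L.map Prod.fst) := by
  rw [PySem.Set.ofList_eq_foldl (L.map Prod.fst), List.foldl_map]; rfl

theorem nodup_fkeys (L : List (String × String)) : (fkeys L).Nodup := by
  rw [fkeys_eq_ofList]; exact PySem.Set.nodup_ofList (L.map Prod.fst)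

theorem fkeys_snoc (L : List (String × String)) (p : String × String) :
    fkeys (L ++ [p]) = if p.1 ∈ fkeys L then fkeys L else fkeys L ++ [p.1] := by
  unfold fkeys; rw [List.foldl_append]; exact PySem.Set.add_eq_ite _ _

theorem lastValIn_snoc (L : List (String × String)) (k v k' : String) :
    lastValIn (L ++ [(k, v)]) k' = if k = k' then v else lastValIn L k' := by
  unfold lastValIn
  rw [List.reverse_append]
  by_cases h : k = k' <;> simp [h]

-- ingestA is stepA over the cleaned pair of the raw line
theorem ingestA_eq (st : List String × PySem.Dict String Nat) (raw : String) :
    ingestA st raw = (cleanStep [] raw).foldl stepA st := by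
  unfold ingestA cleanStep
  by_cases h : PySem.Str.strip (PySem.Str.rstrip raw) = "" <;> simp [h, stepA]

theorem cleanStep_acc (lines : List String) (acc : List (String × String)) :
    lines.foldl cleanStep acc = acc ++ lines.foldl cleanStep [] := by
  induction lines generalizing acc with
  | nil => simp
  | cons a t ih =>
    simp only [List.foldl_cons]
    rw [ih, ih (cleanStep [] a)]
    unfold cleanStep
    by_cases h : PySem.Str.strip (PySem.Str.rstrip a) = "" <;> simp [h]

theorem foldl_ingestA_eq (lines : List String) (st : List String × PySem.Dict String Nat) :
    lines.foldl ingestA st = (lines.foldl cleanStep []).foldl stepA st := by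
  induction lines generalizing st with
  | nil => rfl
  | cons a t ih =>
    simp only [List.foldl_cons]
    rw [ih, cleanStep_acc t (cleanStep [] a), List.foldl_append, ingestA_eq]

-- find? over zipIdx: the position index of a key
theorem find?_zipIdx (l : List String) (k : String) (n : Nat) :
    List.find? (fun q => q.1 == k) (l.zipIdx n) =
      if k ∈ l then some (k, n + l.idxOf k) else none := by
  induction l generalizing n with
  | nil => simp
  | cons a t ih =>
    by_cases hak : a = k
    · subst hak; simp [List.zipIdx_cons]
    · simp [List.zipIdx_cons, hak, ih, Ne.symm hak]
      split_ifs with h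
      · simp [Nat.add_comm, Nat.add_left_comm]
      · rfl

-- pointwise update of a map over a nodup key list = set at the key's index
theorem map_update_eq_set (ks : List String) (k v : String) (f : String → String)
    (hn : ks.Nodup) (hk : k ∈ ks) :
    ks.map (fun k' => if k = k' then v else f k') = (ks.map f).set (ks.idxOf k) v := by
  induction ks with
  | nil => simp at hk
  | cons a t ih =>
    rw [List.nodup_cons] at hn
    rcases List.mem_cons.mp hk with h | h
    · subst h
      rw [List.idxOf_cons_self]
      simp only [List.map_cons, List.set_cons_zero]
      congr 1
      refine List.map_congr_left (fun x hx => ?_)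
      rw [if_neg (fun e => hn.1 (by rwa [e]))]
    · have hne : k ≠ a := fun e => hn.1 (by rwa [← e])
      rw [List.idxOf_cons_ne _ (fun e => hne e.symm)]
      simp only [List.map_cons, if_neg hne, List.set_cons_succ]
      rw [ih hn.2 h]

theorem map_update_eq_self (ks : List String) (k v : String) (f : String → String)
    (hk : k ∉ ks) :
    ks.map (fun k' => if k = k' then v else f k') = ks.map f := by
  refine List.map_congr_left (fun x hx => ?_)
  rw [if_neg (fun e => hk (by rwa [e]))]

-- A's state after folding stepA over pairs L, characterized by fkeys and lastValIn
theorem stepA_fold_char (L : List (String × String)) :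
    (L.foldl stepA ([], PySem.Dict.empty)).1 = (fkeys L).map (lastValIn L) ∧
    (L.foldl stepA ([], PySem.Dict.empty)).2.items = (fkeys L).zipIdx := by
  induction L using List.reverseRecOn with
  | nil => exact ⟨rfl, rfl⟩
  | append_singleton L q ih =>
    obtain ⟨k, v⟩ := q
    obtain ⟨h1, h2⟩ := ih
    rw [List.foldl_append, List.foldl_cons, List.foldl_nil]
    set st := L.foldl stepA ([], PySem.Dict.empty) with hst
    have hget : st.2.get? k = if k ∈ fkeys L then some ((fkeys L).idxOf k) else none := by
      show Option.map Prod.snd (List.find? (fun q => q.1 == k) st.2.items) = _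
      rw [h2, find?_zipIdx]
      split_ifs with hm <;> simp
    have hlv : ∀ k', lastValIn (L ++ [(k, v)]) k' = if k = k' then v else lastValIn L k' :=
      lastValIn_snoc L k v
    by_cases hm : k ∈ fkeys L
    · rw [fkeys_snoc, if_pos hm]
      unfold stepA
      rw [hget, if_pos hm]
      refine ⟨?_, h2⟩
      show st.1.set ((fkeys L).idxOf k) v = (fkeys L).map (lastValIn (L ++ [(k, v)]))
      rw [h1, ← map_update_eq_set (fkeys L) k v (lastValIn L) (nodup_fkeys L) hm]
      exact (List.map_congr_left (fun x _ => (hlv x).symm))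
    · rw [fkeys_snoc, if_neg hm]
      unfold stepA
      rw [hget, if_neg hm]
      have hc : st.2.contains k = false := by
        rw [PySem.Dict.contains_eq_isSome_get?, hget, if_neg hm]; rfl
      have hlen : st.1.length = (fkeys L).length := by rw [h1, List.length_map]
      constructor
      · show st.1 ++ [v] = (fkeys L ++ [k]).map (lastValIn (L ++ [(k, v)]))
        rw [List.map_append, h1]
        congr 1
        · rw [← map_update_eq_self (fkeys L) k v (lastValIn L) hm]
          exact (List.map_congr_left (fun x _ => (hlv x).symm))
        · simp [hlv k]
      · show (st.2.insert k st.1.length).items = (fkeys L ++ [k]).zipIdx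
        rw [PySem.Dict.items_insert_of_not_contains _ _ hc, h2, List.zipIdx_append, hlen]
        simp [List.zipIdx_cons]

-- new first-occurrence keys of M relative to already-seen keys
def gnew (ks : List String) : List (String × String) → List String
  | [] => []
  | p :: M => if PySem.Set.contains ks p.1 then gnew ks M else p.1 :: gnew (ks ++ [p.1]) M

theorem emitStep_fold (pairs M : List (String × String)) (S : PySem.Set String) (out : List String) :
    (M.foldl (emitStep pairs) (S, out)).2 = out ++ (gnew S M).map (lastValIn pairs) := by
  induction M generalizing S out with
  | nil => simp [gnew]
  | cons p M ih =>
    rw [List.foldl_cons]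
    by_cases h : p.1 ∈ S
    · rw [show emitStep pairs (S, out) p = (S, out) from by simp [emitStep, h],
          show gnew S (p :: M) = gnew S M from by simp [gnew, h], ih]
    · rw [show emitStep pairs (S, out) p = (S ++ [p.1], out ++ [lastValIn pairs p.1]) from by
            simp [emitStep, h],
          show gnew S (p :: M) = p.1 :: gnew (S ++ [p.1]) M from by simp [gnew, h], ih]
      simp

theorem gnew_eq (M : List (String × String)) (ks : List String) :
    ks ++ gnew ks M = M.foldl (fun s p => PySem.Set.add s p.1) ks := by
  induction M generalizing ks with
  | nil => simp [gnew]
  | cons p M ih =>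
    rw [List.foldl_cons]
    by_cases h : p.1 ∈ ks
    · have h1 : PySem.Set.add ks p.1 = ks := PySem.Set.add_of_mem h
      rw [show gnew ks (p :: M) = gnew ks M from by simp [gnew, h], h1, ih]
    · have h1 : PySem.Set.add ks p.1 = ks ++ [p.1] := PySem.Set.add_of_not_mem h
      rw [show gnew ks (p :: M) = p.1 :: gnew (ks ++ [p.1]) M from by simp [gnew, h], h1, ← ih]
      simp

theorem gnew_nil_eq_fkeys (M : List (String × String)) : gnew [] M = fkeys M := by
  have := gnew_eq M []
  simpa [fkeys] using this

-- ===== VERDICT (by name: the statement is the Claim_ definition above) =====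
theorem merge_report_status_lines_py_spec : Claim_equal_merge_report_status_lines_py := by
  intro existing updates _
  show merge_report_status_lines_py existing updates = merge_report_status_lines_py_alt existing updates
  show (updates.foldl ingestA (existing.foldl ingestA ([], PySem.Dict.empty))).1
      = (((existing ++ updates).foldl cleanStep []).foldl
          (emitStep ((existing ++ updates).foldl cleanStep [])) (PySem.Set.empty, [])).2
  rw [← List.foldl_append, foldl_ingestA_eq]
  set pairs := (existing ++ updates).foldl cleanStep [] with hp
  rw [(stepA_fold_char pairs).1, emitStep_fold]
  rw [show (PySem.Set.empty : PySem.Set String) = ([] : List String) from rfl]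
  rw [gnew_nil_eq_fkeys]
  simp
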